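-- pv_equiv track=rewrite | github.com/Lortas102066/Python-Basic | Assignment 2/test.py | initialise_board
-- ===== SOURCE A (Python) =====
-- def initialise_board(board, NUM_SQUARES):
--     """
--     Initialize the board with numbers from 1 to NUM_SQUARES in a zig-zag pattern.
--
--     Parameters:
--     board (list of lists): The game board to be initialized.
--     NUM_SQUARES (int): The total number of squares on the board.
--     """
--     num = NUM_SQUARES
--     for i in range(len(board)):
--         for j in range(len(board[i])):
--             if i % 2 == 0:
--                 board[i][j] = str(num)
--             else:
--                 board[i][len(board[i]) - j - 1] = str(num)
--             num -= 1
--     return board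
-- ===== SOURCE B (Python) =====
-- def initialise_board(board, NUM_SQUARES):
--     def fill(rows, i, top):
--         # top = value belonging to the leftmost cell of an even row at this point
--         if not rows:
--             return
--         row = rows[0]
--         w = len(row)
--         if i % 2 == 0:
--             row[:] = [str(top - j) for j in range(w)]
--         else:
--             row[:] = [str(top - w + 1 + j) for j in range(w)]
--         fill(rows[1:], i + 1, top - w)
--     fill(board, 0, NUM_SQUARES)
--     return board
-- ===== Notes on version B (the rewrite author's own statement) =====
-- stated objective: alternative
-- what changed: Replaces A's iterative cell-by-cell writes driven by a global decrementing counter and a mirrored column index with a recursion over rows that computes every cell by a closed-form formula from a per-row top value: even rows as [top - j], odd rows directly in ascending order as [top - w + 1 + j], with no counter, no mirrored index and no reversal.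
import Mathlib
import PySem

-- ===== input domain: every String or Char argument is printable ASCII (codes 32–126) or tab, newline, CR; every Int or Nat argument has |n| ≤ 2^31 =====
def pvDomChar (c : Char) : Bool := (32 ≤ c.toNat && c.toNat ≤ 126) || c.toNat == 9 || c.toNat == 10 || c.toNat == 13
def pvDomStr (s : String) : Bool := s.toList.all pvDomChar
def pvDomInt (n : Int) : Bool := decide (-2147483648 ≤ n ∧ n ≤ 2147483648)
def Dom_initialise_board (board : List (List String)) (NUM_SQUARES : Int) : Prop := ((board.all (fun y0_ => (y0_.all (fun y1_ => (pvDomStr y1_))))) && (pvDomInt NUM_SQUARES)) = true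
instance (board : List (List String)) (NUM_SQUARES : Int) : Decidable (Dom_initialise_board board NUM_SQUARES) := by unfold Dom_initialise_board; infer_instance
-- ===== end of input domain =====

-- B replaces A's counter-driven, mirrored-index cell writes by a recursion over rows that
-- computes every cell by a closed-form formula from a per-row top value (objective: alternative).
-- Both Pythons mutate `board` in place; the equivalence proved here is about the returned value.

-- ===== PORT A =====
-- inner loop of A: for j in range(w): write str(num) at j (even row) or at w-j-1 (odd row); num -= 1
def pvInnerA (w : Nat) (even : Bool) (st : List String × Int) (j : Nat) : List String × Int :=
  ((if even then st.1.set j (PySem.Int.toStr st.2) else st.1.set (w - j - 1) (PySem.Int.toStr st.2)), st.2 - 1)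

-- outer loop of A over the rows, carrying the row index i and the counter num
def pvOuterA : List (List String) → Nat → Int → List (List String)
  | [], _, _ => []
  | r :: rs, i, num =>
    let res := (List.range r.length).foldl (pvInnerA r.length (i % 2 == 0)) (r, num)
    res.1 :: pvOuterA rs (i + 1) res.2

-- NOTE: Python's A mutates `board` in place and returns it; the equivalence proved here
-- is about the returned value (B performs the same in-place mutation via slice assignment).
def initialise_board (board : List (List String)) (NUM_SQUARES : Int) : List (List String) :=
  pvOuterA board 0 NUM_SQUARES

-- ===== PORT B =====
-- B's recursive fill: each row is a closed-form comprehension from the per-row top value;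
-- even rows [str(top - j) for j in range w], odd rows [str(top - w + 1 + j) for j in range w]
def pvFillB : List (List String) → Nat → Int → List (List String)
  | [], _, _ => []
  | r :: rs, i, top =>
    (if i % 2 == 0 then
       (List.range r.length).map (fun j : Nat => PySem.Int.toStr (top - (j : Int)))
     else
       (List.range r.length).map (fun j : Nat => PySem.Int.toStr (top - (r.length : Int) + 1 + (j : Int))))
      :: pvFillB rs (i + 1) (top - (r.length : Int))

def initialise_board_alt (board : List (List String)) (NUM_SQUARES : Int) : List (List String) :=
  pvFillB board 0 NUM_SQUARES

-- ===== PRECONDITION & SPEC =====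
def Spec_initialise_board (board : List (List String)) (NUM_SQUARES : Int) (out : List (List String)) : Prop := out = initialise_board_alt board NUM_SQUARES
instance (board : List (List String)) (NUM_SQUARES : Int) (out : List (List String)) : Decidable (Spec_initialise_board board NUM_SQUARES out) := by unfold Spec_initialise_board; infer_instance

-- ===== CLAIM (what is proved, stated in full; the proofs are below) =====
def Claim_equal_initialise_board : Prop := ∀ (board : List (List String)) (NUM_SQUARES : Int), Dom_initialise_board board NUM_SQUARES → Spec_initialise_board board NUM_SQUARES (initialise_board board NUM_SQUARES)

-- ===== LEMMAS AND PROOFS =====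

-- even rows of A: after m steps the first m cells hold str(num), str(num-1), …
theorem pvEvenFold (row : List String) (num : Int) (m : Nat) (h : m ≤ row.length) :
    (List.range m).foldl (pvInnerA row.length true) (row, num)
      = ((List.range m).map (fun k : Nat => PySem.Int.toStr (num - (k : Int))) ++ row.drop m,
         num - m) := by
  induction m with
  | zero => simp
  | succ m ih =>
    rw [List.range_succ, List.foldl_append, ih (Nat.le_of_succ_le h)]
    have hm : m < row.length := h
    simp only [List.foldl_cons, List.foldl_nil, pvInnerA, if_true, Prod.mk.injEq]
    constructor
    · rw [List.drop_eq_getElem_cons hm, List.set_append]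
      simp only [List.length_map, List.length_range, if_neg (lt_irrefl m), Nat.sub_self]
      simp only [List.map_append, List.map_cons, List.map_nil, List.append_assoc,
        List.singleton_append]
      rw [List.set_cons_zero]
    · push_cast; ring

-- odd rows of A: after m steps the last m cells hold the mirrored values
theorem pvOddFold (row : List String) (num : Int) (m : Nat) (h : m ≤ row.length) :
    (List.range m).foldl (pvInnerA row.length false) (row, num)
      = (row.take (row.length - m)
          ++ (List.range m).map (fun k : Nat => PySem.Int.toStr (num - ((m - 1 - k : Nat) : Int))),
         num - m) := by
  induction m with
  | zero => simp
  | succ m ih =>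
    rw [List.range_succ, List.foldl_append, ih (Nat.le_of_succ_le h)]
    simp only [List.foldl_cons, List.foldl_nil, pvInnerA, if_false, Bool.false_eq_true,
      Prod.mk.injEq]
    have hlt : row.length - m - 1 < (row.take (row.length - m)).length := by
      simp only [List.length_take]; omega
    constructor
    · rw [List.set_append, if_pos hlt, List.set_eq_take_append_cons_drop, if_pos hlt]
      have h1 : (row.take (row.length - m)).take (row.length - m - 1)
          = row.take (row.length - (m + 1)) := by
        rw [List.take_take]; congr 1; omega
      have h2 : (row.take (row.length - m)).drop (row.length - m - 1 + 1) = [] := by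
        apply List.drop_eq_nil_of_le
        simp only [List.length_take]; omega
      rw [h1, h2]
      have h3 : (List.range (m + 1)).map
            (fun k : Nat => PySem.Int.toStr (num - ((m + 1 - 1 - k : Nat) : Int)))
          = PySem.Int.toStr (num - (m : Int))
            :: (List.range m).map
                 (fun k : Nat => PySem.Int.toStr (num - ((m - 1 - k : Nat) : Int))) := by
        rw [List.range_succ_eq_map, List.map_cons, List.map_map]
        congr 1
        apply List.map_congr_left
        intro a ha
        simp only [Function.comp_apply]
        congr 2
        omega
      rw [show List.range m ++ [m] = List.range (m + 1) from List.range_succ.symm, h3]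
      simp
    · push_cast; ring

-- A's mirrored odd-row block is exactly B's ascending closed-form block
theorem pvOddBlock (num : Int) (w : Nat) :
    (List.range w).map (fun k : Nat => PySem.Int.toStr (num - ((w - 1 - k : Nat) : Int)))
      = (List.range w).map (fun j : Nat => PySem.Int.toStr (num - (w : Int) + 1 + (j : Int))) := by
  apply List.map_congr_left
  intro a ha
  have : a < w := List.mem_range.mp ha
  congr 1
  have : ((w - 1 - a : Nat) : Int) = (w : Int) - 1 - (a : Int) := by omega
  rw [this]; ring

-- the two traversals agree row by row when A's counter equals B's top value
theorem pvOuterEq (rs : List (List String)) (i : Nat) (num : Int) :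
    pvOuterA rs i num = pvFillB rs i num := by
  induction rs generalizing i num with
  | nil => rfl
  | cons r rs ih =>
    by_cases he : i % 2 = 0
    · simp only [pvOuterA, pvFillB, he, beq_self_eq_true, if_true]
      rw [pvEvenFold r num r.length le_rfl]
      simp only [List.drop_length, List.append_nil]
      exact List.cons_eq_cons.mpr ⟨rfl, ih (i + 1) (num - r.length)⟩
    · have hb : ((i % 2 : Nat) == 0) = false := by simp [he]
      simp only [pvOuterA, pvFillB, hb, Bool.false_eq_true, if_false]
      rw [pvOddFold r num r.length le_rfl]
      simp only [Nat.sub_self, List.take_zero, List.nil_append]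
      exact List.cons_eq_cons.mpr ⟨pvOddBlock num r.length, ih (i + 1) (num - r.length)⟩

-- ===== VERDICT (by name: the statement is the Claim_ definition above) =====
theorem initialise_board_spec : Claim_equal_initialise_board := by
  intro board N _
  unfold Spec_initialise_board initialise_board initialise_board_alt
  exact pvOuterEq board 0 N
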